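-- pv_equiv track=rewrite | github.com/Jahnavi-Mantripragada/CodeForces | 550/TwoSubstrings.py | twoSubstrings
-- ===== SOURCE A (Python) =====
-- def twoSubstrings(s):
--     if "AB" not in s or "BA" not in s:
--         return "NO"
--     found_ab = -1
--     for i in range(1, len(s)):
--         if s[i-1] + s[i] == "AB":
--             found_ab = i-1
--             break
--
--     for i in range(found_ab+2, len(s)-1):
--         if s[i] + s[i+1] == "BA":
--             return "YES"
--     found_ba = -1
--     for i in range(1, len(s)):
--         if s[i - 1] + s[i] == "BA":
--             found_ba = i - 1
--             break
--     for i in range(found_ba + 2, len(s)-1):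
--         if s[i] + s[i+1] == "AB":
--             return "YES"
--     return "NO"
-- ===== SOURCE B (Python) =====
-- def twoSubstrings(s):
--     n = len(s)
--     ab = [i for i in range(n - 1) if s[i] == 'A' and s[i + 1] == 'B']
--     ba = [i for i in range(n - 1) if s[i] == 'B' and s[i + 1] == 'A']
--     if ab and ba and (ba[-1] >= ab[0] + 2 or ab[-1] >= ba[0] + 2):
--         return "YES"
--     return "NO"
-- ===== Notes on version B (the rewrite author's own statement) =====
-- stated objective: simpler
-- what changed: A's four find-then-scan loops with early returns are replaced by one collection of all AB/BA pair start positions and a constant number of first/last index comparisons (a BA exists at or after first_AB+2 iff the last BA start is >= first_AB+2).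
import Mathlib
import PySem

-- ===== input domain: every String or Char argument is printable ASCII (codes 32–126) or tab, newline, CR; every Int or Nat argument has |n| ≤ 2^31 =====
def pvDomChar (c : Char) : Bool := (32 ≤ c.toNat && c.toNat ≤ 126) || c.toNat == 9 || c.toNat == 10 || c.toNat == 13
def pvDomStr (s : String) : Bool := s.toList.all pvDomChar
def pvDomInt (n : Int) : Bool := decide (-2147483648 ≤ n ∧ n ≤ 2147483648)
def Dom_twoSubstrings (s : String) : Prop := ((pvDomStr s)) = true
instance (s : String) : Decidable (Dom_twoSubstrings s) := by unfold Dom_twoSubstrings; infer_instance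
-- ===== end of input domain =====

-- B replaces A's four find-then-scan loops by collecting all "AB"/"BA" start positions once
-- and comparing first/last indices; same O(n) cost, simpler decomposition (objective: simpler).

-- ===== PORT A =====
-- 'for i in range(1, len(s)): if s[i-1] + s[i] == "AB": found = i - 1; break' (else -1).
-- pyGetD is exact here: every index the loops probe lies in range by construction of the range list.
def pvScanFirst (l : List Char) (c1 c2 : Char) : List Int → Int
  | [] => -1
  | i :: rest =>
    if PySem.List.pyGetD l (i - 1) ' ' = c1 ∧ PySem.List.pyGetD l i ' ' = c2 then i - 1
    else pvScanFirst l c1 c2 rest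

-- 'for i in range(k, len(s)-1): if s[i] + s[i+1] == "BA": return "YES"' (as a Bool).
def pvScanHit (l : List Char) (c1 c2 : Char) : List Int → Bool
  | [] => false
  | i :: rest =>
    if PySem.List.pyGetD l i ' ' = c1 ∧ PySem.List.pyGetD l (i + 1) ' ' = c2 then true
    else pvScanHit l c1 c2 rest

def twoSubstrings (s : String) : String :=
  if !(PySem.Str.isIn "AB" s) || !(PySem.Str.isIn "BA" s) then "NO"
  else
    let l := s.toList
    let n := PySem.Str.len s
    let foundAb := pvScanFirst l 'A' 'B' (PySem.List.pyRange 1 n)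
    if pvScanHit l 'B' 'A' (PySem.List.pyRange (foundAb + 2) (n - 1)) then "YES"
    else
      let foundBa := pvScanFirst l 'B' 'A' (PySem.List.pyRange 1 n)
      if pvScanHit l 'A' 'B' (PySem.List.pyRange (foundBa + 2) (n - 1)) then "YES"
      else "NO"

-- ===== PORT B =====
-- '[i for i in range(n-1) if s[i] == c1 and s[i+1] == c2]'
def pvPairStarts (l : List Char) (c1 c2 : Char) (n : Int) : List Int :=
  (PySem.List.pyRange 0 (n - 1)).filter
    (fun i => PySem.List.pyGetD l i ' ' = c1 ∧ PySem.List.pyGetD l (i + 1) ' ' = c2)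

def twoSubstrings_alt (s : String) : String :=
  let l := s.toList
  let n := PySem.Str.len s
  let ab := pvPairStarts l 'A' 'B' n
  let ba := pvPairStarts l 'B' 'A' n
  if ab ≠ [] ∧ ba ≠ [] ∧
      (PySem.List.pyGetD ba (-1) 0 ≥ PySem.List.pyGetD ab 0 0 + 2 ∨
       PySem.List.pyGetD ab (-1) 0 ≥ PySem.List.pyGetD ba 0 0 + 2) then "YES"
  else "NO"

-- ===== PRECONDITION & SPEC =====
def Spec_twoSubstrings (s : String) (out : String) : Prop := out = twoSubstrings_alt s
instance (s : String) (out : String) : Decidable (Spec_twoSubstrings s out) := by unfold Spec_twoSubstrings; infer_instance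

-- ===== CLAIM (what is proved, stated in full; the proofs are below) =====
def Claim_equal_twoSubstrings : Prop := ∀ (s : String), Dom_twoSubstrings s → Spec_twoSubstrings s (twoSubstrings s)

-- ===== LEMMAS AND PROOFS =====

-- the suffix of pvPairStarts from position a (proof-side device)
def pvSuffix (l : List Char) (c1 c2 : Char) (a n : Int) : List Int :=
  (PySem.List.pyRange a (n - 1)).filter
    (fun i => PySem.List.pyGetD l i ' ' = c1 ∧ PySem.List.pyGetD l (i + 1) ' ' = c2)

lemma pvSuffix_zero (l : List Char) (c1 c2 : Char) (n : Int) :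
    pvSuffix l c1 c2 0 n = pvPairStarts l c1 c2 n := rfl

lemma mem_pvSuffix {l : List Char} {c1 c2 : Char} {a n i : Int} :
    i ∈ pvSuffix l c1 c2 a n ↔
      (a ≤ i ∧ i < n - 1) ∧
        (PySem.List.pyGetD l i ' ' = c1 ∧ PySem.List.pyGetD l (i + 1) ' ' = c2) := by
  simp [pvSuffix, List.mem_filter, PySem.List.mem_pyRange_one]

lemma pairwise_pvSuffix (l : List Char) (c1 c2 : Char) (a n : Int) :
    (pvSuffix l c1 c2 a n).Pairwise (· < ·) :=
  (PySem.List.pairwise_lt_pyRange_one a (n - 1)).filter _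


lemma le_getLast_of_pairwise_lt (xs : List Int) (hp : xs.Pairwise (· < ·))
    (h : xs ≠ []) (x : Int) (hx : x ∈ xs) : x ≤ xs.getLast h := by
  induction xs with
  | nil => simp at hx
  | cons a t ih =>
    rcases List.pairwise_cons.mp hp with ⟨ha, hpt⟩
    cases t with
    | nil => simp_all
    | cons b t' =>
      rw [List.getLast_cons (by simp)]
      rcases List.mem_cons.mp hx with rfl | hx'
      · exact le_of_lt (ha _ (List.getLast_mem _))
      · exact ih hpt (by simp) hx'

lemma scanHit_eq_any (l : List Char) (c1 c2 : Char) :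
    ∀ (idxs : List Int),
      pvScanHit l c1 c2 idxs =
        idxs.any (fun i => decide (PySem.List.pyGetD l i ' ' = c1 ∧ PySem.List.pyGetD l (i + 1) ' ' = c2))
  | [] => rfl
  | i :: rest => by
    rw [pvScanHit, List.any_cons]
    split <;> simp_all [scanHit_eq_any l c1 c2 rest]
lemma scanFirst_eq (l : List Char) (c1 c2 : Char) (n : Int) :
    ∀ (k : Nat) (a : Int), 0 ≤ a → n - a ≤ (k : Int) →
      pvScanFirst l c1 c2 (PySem.List.pyRange (a + 1) n) =
        ((pvSuffix l c1 c2 a n).head?).getD (-1) := by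
  intro k
  induction k with
  | zero =>
    intro a ha hk
    rw [PySem.List.pyRange_one_eq_nil (by omega)]
    unfold pvSuffix
    rw [PySem.List.pyRange_one_eq_nil (by omega)]
    rfl
  | succ k ih =>
    intro a ha hk
    by_cases hlt : a + 1 < n
    · unfold pvSuffix
      rw [PySem.List.pyRange_one_cons (a := a) (b := n - 1) (by omega), List.filter_cons]
      rw [PySem.List.pyRange_one_cons (a := a + 1) (b := n) hlt, pvScanFirst]
      have : a + 1 - 1 = a := by ring
      rw [this]
      by_cases hp : PySem.List.pyGetD l a ' ' = c1 ∧ PySem.List.pyGetD l (a + 1) ' ' = c2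
      · rw [if_pos hp]
        simp [hp]
      · rw [if_neg hp]
        simp only [hp, decide_false]
        have := ih (a + 1) (by omega) (by omega)
        rw [this]
        rfl
    · rw [PySem.List.pyRange_one_eq_nil (by omega)]
      unfold pvSuffix
      rw [PySem.List.pyRange_one_eq_nil (by omega)]
      rfl

lemma scanHit_iff (l : List Char) (c1 c2 : Char) (k n : Int) :
    pvScanHit l c1 c2 (PySem.List.pyRange k (n - 1)) = true ↔
      pvSuffix l c1 c2 k n ≠ [] := by
  rw [scanHit_eq_any, List.any_eq_true]
  unfold pvSuffix
  rw [Ne, List.filter_eq_nil_iff]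
  push Not
  simp

lemma infix2_iff (a b : Char) : ∀ (l : List Char),
    [a, b] <:+: l ↔ ∃ k : Nat, l[k]? = some a ∧ l[k + 1]? = some b := by
  intro l
  induction l with
  | nil => simp
  | cons x xs ih =>
    rw [List.infix_cons_iff, ih]
    constructor
    · rintro (hpre | ⟨k, h1, h2⟩)
      · rcases List.cons_prefix_cons.mp hpre with ⟨rfl, h2⟩
        refine ⟨0, by simp, ?_⟩
        cases xs with
        | nil => simp at h2
        | cons y ys => rcases List.cons_prefix_cons.mp h2 with ⟨rfl, _⟩; simp
      · exact ⟨k + 1, by simpa using h1, by simpa using h2⟩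
    · rintro ⟨k, h1, h2⟩
      cases k with
      | zero =>
        left
        simp at h1
        subst h1
        cases xs with
        | nil => simp at h2
        | cons y ys => simp at h2; subst h2; simp [List.cons_prefix_cons]
      | succ k => right; exact ⟨k, by simpa using h1, by simpa using h2⟩
lemma pairStarts_ne_nil_iff (l : List Char) (c1 c2 : Char) :
    pvPairStarts l c1 c2 (l.length : Int) ≠ [] ↔ [c1, c2] <:+: l := by
  rw [infix2_iff]
  unfold pvPairStarts
  rw [Ne, List.filter_eq_nil_iff]
  push Not
  constructor
  · rintro ⟨i, hi, hp⟩
    rw [PySem.List.mem_pyRange_one] at hi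
    simp only [decide_eq_true_eq] at hp
    refine ⟨i.toNat, ?_, ?_⟩
    · rw [PySem.List.pyGetD_eq_getElem l ' ' hi.1 (by omega)] at hp
      rw [List.getElem?_eq_getElem (by omega)]
      exact congrArg some hp.1
    · have h2 := hp.2
      rw [PySem.List.pyGetD_eq_getElem l ' ' (by omega) (by omega)] at h2
      rw [List.getElem?_eq_getElem (by omega)]
      have h3 : (i + 1).toNat = i.toNat + 1 := by omega
      simp only [h3] at h2
      exact congrArg some h2
  · rintro ⟨k, h1, h2⟩
    have hk1 : k + 1 < l.length := (List.getElem?_eq_some_iff.mp h2).1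
    refine ⟨(k : Int), ?_, ?_⟩
    · rw [PySem.List.mem_pyRange_one]; omega
    · simp only [decide_eq_true_eq]
      constructor
      · rw [PySem.List.pyGetD_eq_getElem l ' ' (by omega) (by simp; omega)]
        have := List.getElem?_eq_some_iff.mp h1
        simp only [Int.toNat_natCast]
        exact this.2
      · have : (k : Int) + 1 = ((k + 1 : Nat) : Int) := by omega
        rw [this, PySem.List.pyGetD_eq_getElem l ' ' (by omega) (by simp; omega)]
        have := List.getElem?_eq_some_iff.mp h2
        simp only [Int.toNat_natCast]
        exact this.2
lemma headD_eq_head (xs : List Int) (h : xs ≠ []) : (xs.head?).getD (-1) = xs.head h := by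
  cases xs with | nil => exact absurd rfl h | cons x t => rfl

lemma pyGetD_zero_eq_head (xs : List Int) (h : xs ≠ []) : PySem.List.pyGetD xs 0 0 = xs.head h := by
  cases xs with | nil => exact absurd rfl h | cons x t => simp [PySem.List.pyGetD_zero]

lemma suffix_ne_iff_le_getLast (l : List Char) (c1 c2 : Char) (k n : Int) (hk : 0 ≤ k)
    (hne : pvPairStarts l c1 c2 n ≠ []) :
    pvSuffix l c1 c2 k n ≠ [] ↔ k ≤ (pvPairStarts l c1 c2 n).getLast hne := by
  constructor
  · intro h
    obtain ⟨i, hi⟩ := List.exists_mem_of_ne_nil _ h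
    rw [mem_pvSuffix] at hi
    have him : i ∈ pvPairStarts l c1 c2 n := by
      rw [← pvSuffix_zero, mem_pvSuffix]
      exact ⟨⟨by omega, hi.1.2⟩, hi.2⟩
    have := le_getLast_of_pairwise_lt _ (by rw [← pvSuffix_zero]; exact pairwise_pvSuffix l c1 c2 0 n) hne i him
    omega
  · intro h
    have hmem0 := List.getLast_mem hne
    have hmem : (pvPairStarts l c1 c2 n).getLast hne ∈ pvSuffix l c1 c2 0 n := by
      rw [pvSuffix_zero]; exact hmem0
    rw [mem_pvSuffix] at hmem
    intro hnil
    have : (pvPairStarts l c1 c2 n).getLast hne ∈ pvSuffix l c1 c2 k n := by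
      rw [mem_pvSuffix]
      exact ⟨⟨h, hmem.1.2⟩, hmem.2⟩
    rw [hnil] at this
    simp at this

lemma head_nonneg (l : List Char) (c1 c2 : Char) (hne : pvPairStarts l c1 c2 ((l.length : Int)) ≠ []) :
    0 ≤ (pvPairStarts l c1 c2 ((l.length : Int))).head hne := by
  have h' : (pvPairStarts l c1 c2 ((l.length : Int))).head hne ∈ pvSuffix l c1 c2 0 ((l.length : Int)) := by
    rw [pvSuffix_zero]; exact List.head_mem hne
  exact (mem_pvSuffix.mp h').1.1

-- ===== VERDICT (by name: the statement is the Claim_ definition above) =====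
theorem twoSubstrings_spec : Claim_equal_twoSubstrings := by
  intro s _
  show twoSubstrings s = twoSubstrings_alt s
  simp only [twoSubstrings, twoSubstrings_alt, PySem.Str.len_eq]
  have habIn : PySem.Str.isIn "AB" s = true ↔ pvPairStarts s.toList 'A' 'B' ((s.toList.length : Int)) ≠ [] := by
    rw [PySem.Str.isIn_iff_infix, pairStarts_ne_nil_iff, show ("AB").toList = ['A', 'B'] from rfl]
  have hbaIn : PySem.Str.isIn "BA" s = true ↔ pvPairStarts s.toList 'B' 'A' ((s.toList.length : Int)) ≠ [] := by
    rw [PySem.Str.isIn_iff_infix, pairStarts_ne_nil_iff, show ("BA").toList = ['B', 'A'] from rfl]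
  by_cases h1 : PySem.Str.isIn "AB" s = true
  · by_cases h2 : PySem.Str.isIn "BA" s = true
    · have hA := habIn.mp h1
      have hB := hbaIn.mp h2
      rw [if_neg (by simp only [h1, h2]; decide)]
      have hsf : ∀ (c1 c2 : Char), pvScanFirst s.toList c1 c2 (PySem.List.pyRange 1 ((s.toList.length : Int))) =
          ((pvPairStarts s.toList c1 c2 ((s.toList.length : Int))).head?).getD (-1) := by
        intro c1 c2
        have := scanFirst_eq s.toList c1 c2 ((s.toList.length : Int)) s.toList.length 0 le_rfl (by omega)
        simpa [pvSuffix_zero] using this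
      simp only [hsf 'A' 'B', hsf 'B' 'A', headD_eq_head _ hA, headD_eq_head _ hB]
      have hc1 : (pvScanHit s.toList 'B' 'A'
            (PySem.List.pyRange ((pvPairStarts s.toList 'A' 'B' ((s.toList.length : Int))).head hA + 2) ((s.toList.length : Int) - 1)) = true)
          ↔ (pvPairStarts s.toList 'A' 'B' ((s.toList.length : Int))).head hA + 2 ≤
              (pvPairStarts s.toList 'B' 'A' ((s.toList.length : Int))).getLast hB := by
        rw [scanHit_iff, suffix_ne_iff_le_getLast s.toList 'B' 'A' _ _ (by have := head_nonneg _ _ _ hA; omega) hB]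
      have hc2 : (pvScanHit s.toList 'A' 'B'
            (PySem.List.pyRange ((pvPairStarts s.toList 'B' 'A' ((s.toList.length : Int))).head hB + 2) ((s.toList.length : Int) - 1)) = true)
          ↔ (pvPairStarts s.toList 'B' 'A' ((s.toList.length : Int))).head hB + 2 ≤
              (pvPairStarts s.toList 'A' 'B' ((s.toList.length : Int))).getLast hA := by
        rw [scanHit_iff, suffix_ne_iff_le_getLast s.toList 'A' 'B' _ _ (by have := head_nonneg _ _ _ hB; omega) hA]
      simp only [PySem.List.pyGetD_neg_one _ 0 hA, PySem.List.pyGetD_neg_one _ 0 hB,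
          pyGetD_zero_eq_head _ hA, pyGetD_zero_eq_head _ hB, ge_iff_le]
      by_cases hd1 : (pvPairStarts s.toList 'A' 'B' ((s.toList.length : Int))).head hA + 2 ≤
          (pvPairStarts s.toList 'B' 'A' ((s.toList.length : Int))).getLast hB
      · rw [if_pos (hc1.mpr hd1), if_pos ⟨hA, hB, Or.inl (by omega)⟩]
      · rw [if_neg (fun hc => hd1 (hc1.mp hc))]
        by_cases hd2 : (pvPairStarts s.toList 'B' 'A' ((s.toList.length : Int))).head hB + 2 ≤
            (pvPairStarts s.toList 'A' 'B' ((s.toList.length : Int))).getLast hA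
        · rw [if_pos (hc2.mpr hd2), if_pos ⟨hA, hB, Or.inr (by omega)⟩]
        · rw [if_neg (fun hc => hd2 (hc2.mp hc)), if_neg ?_]
          rintro ⟨-, -, h | h⟩
          · exact hd1 (by omega)
          · exact hd2 (by omega)
    · have hba : pvPairStarts s.toList 'B' 'A' ((s.toList.length : Int)) = [] := by
        by_contra hc; exact h2 (hbaIn.mpr hc)
      have h2' : PySem.Str.isIn "BA" s = false := by
        cases h : PySem.Str.isIn "BA" s
        · rfl
        · exact absurd h h2
      rw [if_pos (by simp only [h2', Bool.not_false, Bool.or_true]), if_neg (by rintro ⟨-, hne, -⟩; exact hne hba)]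
  · have hab : pvPairStarts s.toList 'A' 'B' ((s.toList.length : Int)) = [] := by
      by_contra hc; exact h1 (habIn.mpr hc)
    have h1' : PySem.Str.isIn "AB" s = false := by
      cases h : PySem.Str.isIn "AB" s
      · rfl
      · exact absurd h h1
    rw [if_pos (by simp only [h1', Bool.not_false, Bool.true_or]), if_neg (by rintro ⟨hne, -, -⟩; exact hne hab)]
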